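-- pv_equiv track=rewrite | github.com/blackdogcode/PythonBoot | Algorithm/ALLERGY/test.py | can_everyone_eat
-- ===== SOURCE A (Python) =====
-- def can_everyone_eat(menu, food_table, n, m):
--     ret = [0] * n
--     for food in menu:
--         for friend in range(n):
--             if food_table[friend][food] == 1:
--                 ret[friend] = 1
--
--     if all(ret):
--         return True
--     else:
--         return False
-- ===== SOURCE B (Python) =====
-- def can_everyone_eat(menu, food_table, n, m):
--     friend = 0
--     while friend < n:
--         if not any(food_table[friend][food] == 1 for food in menu):
--             return False
--         friend += 1
--     return True
-- ===== Notes on version B (the rewrite author's own statement) =====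
-- stated objective: simpler
-- what changed: Replaces A's menu-outer double loop that mutates a flag array (then all(ret)) by a friend-outer while loop that short-circuits: it returns False as soon as one friend can eat no menu food, maintaining no state array.
import Mathlib
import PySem

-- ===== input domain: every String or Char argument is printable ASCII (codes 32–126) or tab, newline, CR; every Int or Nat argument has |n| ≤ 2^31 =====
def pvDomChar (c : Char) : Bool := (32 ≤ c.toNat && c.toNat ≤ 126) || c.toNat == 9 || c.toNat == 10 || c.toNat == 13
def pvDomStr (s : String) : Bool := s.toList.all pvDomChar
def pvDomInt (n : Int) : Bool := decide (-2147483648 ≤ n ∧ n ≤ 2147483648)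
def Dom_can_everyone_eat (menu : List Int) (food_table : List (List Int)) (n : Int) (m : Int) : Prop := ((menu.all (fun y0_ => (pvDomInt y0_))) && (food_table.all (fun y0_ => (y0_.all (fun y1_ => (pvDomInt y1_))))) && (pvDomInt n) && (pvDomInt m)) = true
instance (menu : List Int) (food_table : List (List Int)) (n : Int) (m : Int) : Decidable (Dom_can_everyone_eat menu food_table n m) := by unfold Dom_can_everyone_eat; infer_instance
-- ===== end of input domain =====

-- B replaces A's menu-outer double loop over a mutable flag array (then all(ret)) with a
-- friend-outer while loop that short-circuits on the first friend who can eat nothing;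
-- same cost, simpler. 'm' is unused by both.

-- ===== PORT A =====
-- ret = [0] * n;  for food in menu: for friend in range(n): if food_table[friend][food] == 1: ret[friend] = 1;
-- return True if all(ret) else False
def can_everyone_eat (menu : List Int) (food_table : List (List Int)) (n : Int) (m : Int) : Bool :=
  (menu.foldl (fun ret food =>
      (PySem.List.pyRange 0 n 1).foldl (fun r friend =>
        if (PySem.List.pyGet? ((PySem.List.pyGet? food_table friend).getD []) food).getD 0 == 1
        then r.set friend.toNat 1 else r) ret)
    (List.replicate n.toNat (0:Int))).all (fun x => x != 0)

-- ===== PORT B =====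
-- any(food_table[friend][food] == 1 for food in menu)
def pvFriendEats (food_table : List (List Int)) (menu : List Int) (friend : Int) : Bool :=
  menu.any (fun food =>
    (PySem.List.pyGet? ((PySem.List.pyGet? food_table friend).getD []) food).getD 0 == 1)

-- the while loop: fuel = remaining iterations of 'while friend < n' (exactly (n - friend).toNat at entry)
def pvWhile (menu : List Int) (food_table : List (List Int)) : Nat → Int → Bool
  | 0, _ => true
  | fuel + 1, friend =>
      if pvFriendEats food_table menu friend then pvWhile menu food_table fuel (friend + 1)
      else false

-- friend = 0; while friend < n: if not any(...): return False; friend += 1; return True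
def can_everyone_eat_alt (menu : List Int) (food_table : List (List Int)) (n : Int) (m : Int) : Bool :=
  pvWhile menu food_table n.toNat 0

-- ===== PRECONDITION & SPEC =====
-- Pre_ excludes exactly the inputs where Python A raises IndexError: a nonempty menu with
-- 0 < n needs at least n rows in food_table and every menu entry a valid Python index into
-- each of the first n rows.
def Pre_can_everyone_eat (menu : List Int) (food_table : List (List Int)) (n : Int) (m : Int) : Prop :=
  menu ≠ [] → 0 < n →
    n ≤ (food_table.length : Int) ∧
    ∀ row ∈ food_table.take n.toNat, ∀ f ∈ menu, -(row.length : Int) ≤ f ∧ f < (row.length : Int)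
instance (menu : List Int) (food_table : List (List Int)) (n : Int) (m : Int) : Decidable (Pre_can_everyone_eat menu food_table n m) := by unfold Pre_can_everyone_eat; infer_instance

def pvWitness_can_everyone_eat : List Int × List (List Int) × Int × Int := ([0], [[1]], 1, 1)

def Spec_can_everyone_eat (menu : List Int) (food_table : List (List Int)) (n : Int) (m : Int) (out : Bool) : Prop := out = can_everyone_eat_alt menu food_table n m
instance (menu : List Int) (food_table : List (List Int)) (n : Int) (m : Int) (out : Bool) : Decidable (Spec_can_everyone_eat menu food_table n m out) := by unfold Spec_can_everyone_eat; infer_instance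

-- ===== CLAIM (what is proved, stated in full; the proofs are below) =====
def Claim_equal_can_everyone_eat : Prop := ∀ (menu : List Int) (food_table : List (List Int)) (n : Int) (m : Int), Dom_can_everyone_eat menu food_table n m → Pre_can_everyone_eat menu food_table n m → Spec_can_everyone_eat menu food_table n m (can_everyone_eat menu food_table n m)

-- ===== LEMMAS AND PROOFS =====

-- the inner for-friend loop preserves the length of ret
lemma pv_inner_length (c' : Int → Bool) (L ret : List Int) :
    (L.foldl (fun r fr => if c' fr then r.set fr.toNat 1 else r) ret).length = ret.length := by
  induction L generalizing ret with
  | nil => rfl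
  | cons fr L ih => simp only [List.foldl_cons]; rw [ih]; split <;> simp

-- pointwise effect of the inner for-friend loop (all visited indices are nonnegative)
lemma pv_inner_getElem? (c' : Int → Bool) (L : List Int) (h : ∀ fr ∈ L, 0 ≤ fr) :
    ∀ (ret : List Int) (i : Nat), i < ret.length →
    (L.foldl (fun r fr => if c' fr then r.set fr.toNat 1 else r) ret)[i]? =
      if L.any (fun fr => fr == (i : Int) && c' fr) then some 1 else ret[i]? := by
  induction L with
  | nil => intro ret i hi; simp
  | cons fr L ih =>
    intro ret i hi
    have hfr : 0 ≤ fr := h fr (List.mem_cons_self ..)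
    have hL : ∀ x ∈ L, 0 ≤ x := fun x hx => h x (List.mem_cons_of_mem _ hx)
    simp only [List.foldl_cons, List.any_cons]
    have hi' : i < (if c' fr then ret.set fr.toNat 1 else ret).length := by
      split <;> simpa using hi
    rw [ih hL _ i hi']
    by_cases hany : L.any (fun x => x == (i : Int) && c' x) = true
    · simp [hany]
    · simp only [hany, Bool.or_false]
      by_cases hc : c' fr = true
      · by_cases heq : fr = (i : Int)
        · rw [heq] at hc
          have hnat : ((i : Int)).toNat = i := by omega
          simp [heq, hc, hnat, hi]
        · have hne : fr.toNat ≠ i := by omega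
          simp [hc, heq, List.getElem?_set_ne hne]
      · simp [hc]

-- when i < n, scanning range(n) for index i reduces to the condition at i
lemma pv_any_pyRange (c' : Int → Bool) (n : Int) (i : Nat) (hi : (i : Int) < n) :
    (PySem.List.pyRange 0 n 1).any (fun fr => fr == (i : Int) && c' fr) = c' (i : Int) := by
  by_cases hc : c' (i : Int) = true
  · rw [hc]
    refine List.any_eq_true.mpr ⟨(i : Int), ?_, ?_⟩
    · rw [PySem.List.mem_pyRange_one]; omega
    · simp [hc]
  · simp only [Bool.not_eq_true] at hc
    rw [hc]
    refine List.any_eq_false.mpr ?_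
    intro x hx
    by_cases hxi : x = (i : Int) <;> simp [hxi, hc]

-- pointwise effect of A's double loop: ret[i] becomes 1 iff some menu food works for friend i
lemma pv_outer_getElem? (c' : Int → Int → Bool) (n : Int) :
    ∀ (menu ret : List Int) (i : Nat), i < ret.length → ((ret.length : Int) ≤ n) →
    (menu.foldl (fun ret food =>
        (PySem.List.pyRange 0 n 1).foldl (fun r fr => if c' fr food then r.set fr.toNat 1 else r) ret) ret)[i]? =
      if menu.any (fun food => c' (i : Int) food) then some 1 else ret[i]? := by
  intro menu
  induction menu with
  | nil => intro ret i hi _; simp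
  | cons food rest ih =>
    intro ret i hi hlen
    simp only [List.foldl_cons, List.any_cons]
    have hlen' : ((PySem.List.pyRange 0 n 1).foldl
        (fun r fr => if c' fr food then r.set fr.toNat 1 else r) ret).length = ret.length :=
      pv_inner_length _ _ _
    rw [ih _ i (by omega) (by omega)]
    have hin : ∀ fr ∈ PySem.List.pyRange 0 n 1, 0 ≤ fr := by
      intro fr hfr; rw [PySem.List.mem_pyRange_one] at hfr; omega
    by_cases hany : rest.any (fun f => c' (i : Int) f) = true
    · simp [hany]
    · simp only [hany, Bool.or_false]
      rw [pv_inner_getElem? _ _ hin ret i hi,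
          pv_any_pyRange (fun fr => c' fr food) n i (by omega)]
      by_cases hc : c' (i : Int) food = true <;> simp [hc]

-- A's whole computation answers: every friend in range(n) eats some menu food
lemma pv_main (c' : Int → Int → Bool) (menu : List Int) (n : Int) :
    ((menu.foldl (fun ret food =>
        (PySem.List.pyRange 0 n 1).foldl (fun r fr => if c' fr food then r.set fr.toNat 1 else r) ret)
      (List.replicate n.toNat (0:Int))).all (fun x => x != 0))
    = (PySem.List.pyRange 0 n 1).all (fun fr => menu.any (fun food => c' fr food)) := by
  have hlen : ∀ (ms r0 : List Int),
      (ms.foldl (fun ret food =>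
        (PySem.List.pyRange 0 n 1).foldl (fun r fr => if c' fr food then r.set fr.toNat 1 else r) ret) r0).length
      = r0.length := by
    intro ms
    induction ms with
    | nil => intro r0; rfl
    | cons f rest ih => intro r0; simp only [List.foldl_cons]; rw [ih, pv_inner_length]
  have hL : (menu.foldl (fun ret food =>
        (PySem.List.pyRange 0 n 1).foldl (fun r fr => if c' fr food then r.set fr.toNat 1 else r) ret)
      (List.replicate n.toNat (0:Int))).length = n.toNat := by rw [hlen]; simp
  have key : ∀ i : Nat, i < n.toNat →
      (menu.foldl (fun ret food =>
        (PySem.List.pyRange 0 n 1).foldl (fun r fr => if c' fr food then r.set fr.toNat 1 else r) ret)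
      (List.replicate n.toNat (0:Int)))[i]? =
      if menu.any (fun food => c' (i : Int) food) then some 1 else some 0 := by
    intro i hi
    rw [pv_outer_getElem? c' n menu (List.replicate n.toNat (0:Int)) i (by simpa using hi) (by simp; omega)]
    simp [hi]
  rw [Bool.eq_iff_iff, List.all_eq_true, List.all_eq_true]
  constructor
  · intro h fr hfr
    rw [PySem.List.mem_pyRange_one] at hfr
    have h0 : 0 ≤ fr := hfr.1
    have hi : fr.toNat < n.toNat := by omega
    have hk := key fr.toNat hi
    by_contra hne
    rw [Int.toNat_of_nonneg h0] at hk
    rw [if_neg (by simpa using hne)] at hk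
    have hmem : (0 : Int) ∈ _ := List.mem_of_getElem? hk
    have := h 0 hmem
    simp at this
  · intro h x hx
    obtain ⟨i, hi, rfl⟩ := List.mem_iff_getElem.mp hx
    have hi' : i < n.toNat := by omega
    have hk := key i hi'
    rw [List.getElem?_eq_getElem hi] at hk
    have hmenu := h (i : Int) (by rw [PySem.List.mem_pyRange_one]; omega)
    rw [if_pos hmenu] at hk
    simp only [Option.some.injEq] at hk
    simp [hk]

-- B's while loop with fuel k from friend i answers: friends i, i+1, …, i+k-1 all eat
lemma pv_while_spec (menu : List Int) (food_table : List (List Int)) :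
    ∀ (k : Nat) (i : Int),
      pvWhile menu food_table k i
        = decide (∀ j : Int, i ≤ j → j < i + k → pvFriendEats food_table menu j = true) := by
  intro k
  induction k with
  | zero =>
    intro i
    simp only [pvWhile]
    symm; rw [decide_eq_true_iff]; intro j h1 h2; omega
  | succ k ih =>
    intro i
    simp only [pvWhile]
    by_cases hc : pvFriendEats food_table menu i = true
    · rw [if_pos hc, ih (i + 1)]
      rw [Bool.eq_iff_iff, decide_eq_true_iff, decide_eq_true_iff]
      constructor
      · intro h j h1 h2
        by_cases hij : j = i
        · rw [hij]; exact hc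
        · exact h j (by omega) (by push_cast; omega)
      · intro h j h1 h2
        exact h j (by omega) (by push_cast at h2 ⊢; omega)
    · rw [if_neg hc]
      symm; rw [decide_eq_false_iff_not]
      intro h
      exact hc (h i (le_refl i) (by omega))

-- the range(n) all-reduction equals the while loop
lemma pv_range_eq_while (menu : List Int) (food_table : List (List Int)) (n : Int) :
    (PySem.List.pyRange 0 n 1).all (fun fr => pvFriendEats food_table menu fr)
      = pvWhile menu food_table n.toNat 0 := by
  rw [pv_while_spec]
  rw [Bool.eq_iff_iff, List.all_eq_true, decide_eq_true_iff]
  constructor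
  · intro h j h1 h2
    exact h j (by rw [PySem.List.mem_pyRange_one]; omega)
  · intro h fr hfr
    rw [PySem.List.mem_pyRange_one] at hfr
    exact h fr hfr.1 (by omega)

-- ===== VERDICT (by name: the statement is the Claim_ definition above) =====
theorem can_everyone_eat_spec : Claim_equal_can_everyone_eat := by
  intro menu food_table n m _hdom _hpre
  unfold Spec_can_everyone_eat can_everyone_eat can_everyone_eat_alt
  rw [pv_main
    (fun fr food => (PySem.List.pyGet? ((PySem.List.pyGet? food_table fr).getD []) food).getD 0 == 1)
    menu n]
  exact pv_range_eq_while menu food_table n
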